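-- pv_equiv track=rewrite | github.com/vladhugec/Course-Work | comp11 - intro/proj1/similarity.py | incommon_words
-- ===== SOURCE A (Python) =====
-- def incommon_words(cwf1, cwf2):
--     words_file1 = {}
--     for word in cwf1:
--         words_file1[word] = 0
--
--     for word in cwf2:
--         if word in words_file1:
--             words_file1[word] += 1
--         else:
--             pass
--
--     matchedwords = []
--     for each in words_file1:
--         if words_file1[each] > 0:
--             matchedwords.append(each)
--
--     return matchedwords
-- ===== SOURCE B (Python) =====
-- def incommon_words(cwf1, cwf2):
--     cwf2_set = set(cwf2)
--     seen = set()
--     result = []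
--     for word in cwf1:
--         if word in cwf2_set and word not in seen:
--             seen.add(word)
--             result.append(word)
--     return result
-- ===== Notes on version B (the rewrite author's own statement) =====
-- stated objective: simpler
-- what changed: Replaces A's three-phase structure (build a zero-initialised dict from cwf1, count cwf2 hits into it, then filter keys with positive count) by a single pass over cwf1 with a cwf2 membership set and a seen-set, appending each first occurrence that is in cwf2.
import Mathlib
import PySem

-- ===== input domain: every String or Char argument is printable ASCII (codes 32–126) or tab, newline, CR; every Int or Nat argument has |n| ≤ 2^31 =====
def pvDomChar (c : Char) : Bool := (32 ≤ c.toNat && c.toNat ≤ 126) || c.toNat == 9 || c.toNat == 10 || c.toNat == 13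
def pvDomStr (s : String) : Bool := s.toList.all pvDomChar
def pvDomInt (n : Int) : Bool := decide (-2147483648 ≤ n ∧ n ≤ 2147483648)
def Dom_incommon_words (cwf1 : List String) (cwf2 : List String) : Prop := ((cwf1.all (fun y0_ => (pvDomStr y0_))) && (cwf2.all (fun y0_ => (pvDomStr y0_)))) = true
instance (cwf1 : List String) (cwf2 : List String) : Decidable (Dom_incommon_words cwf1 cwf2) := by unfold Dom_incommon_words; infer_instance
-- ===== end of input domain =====

-- B replaces A's three-phase dict counting with one direct pass over cwf1 (simpler decomposition, same result).

-- ===== PORT A =====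
def incommon_words (cwf1 : List String) (cwf2 : List String) : List String :=
  -- words_file1 = {}; for word in cwf1: words_file1[word] = 0
  let d0 : PySem.Dict String Int :=
    cwf1.foldl (fun d word => d.insert word 0) PySem.Dict.empty
  -- for word in cwf2: if word in words_file1: words_file1[word] += 1 else: pass
  let d1 : PySem.Dict String Int :=
    cwf2.foldl (fun d word => if d.contains word then d.modify word 0 (· + 1) else d) d0
  -- matchedwords = []; for each in words_file1: if words_file1[each] > 0: matchedwords.append(each)
  d1.keys.foldl (fun acc each => if d1.getD each 0 > 0 then acc ++ [each] else acc) []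

-- ===== PORT B =====
def incommon_words_alt (cwf1 : List String) (cwf2 : List String) : List String :=
  let cwf2_set : PySem.Set String := PySem.Set.ofList cwf2
  -- seen = set(); result = []; one pass over cwf1
  (cwf1.foldl
    (fun (st : PySem.Set String × List String) word =>
      if cwf2_set.contains word && !(PySem.Set.contains st.1 word) then
        (PySem.Set.add st.1 word, st.2 ++ [word])
      else st)
    (PySem.Set.empty, [])).2

-- ===== PRECONDITION & SPEC =====
def Spec_incommon_words (cwf1 : List String) (cwf2 : List String) (out : List String) : Prop := out = incommon_words_alt cwf1 cwf2
instance (cwf1 : List String) (cwf2 : List String) (out : List String) : Decidable (Spec_incommon_words cwf1 cwf2 out) := by unfold Spec_incommon_words; infer_instance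

-- ===== CLAIM (what is proved, stated in full; the proofs are below) =====
def Claim_equal_incommon_words : Prop := ∀ (cwf1 : List String) (cwf2 : List String), Dom_incommon_words cwf1 cwf2 → Spec_incommon_words cwf1 cwf2 (incommon_words cwf1 cwf2)

-- ===== LEMMAS AND PROOFS =====

-- Phase 1 of A stores 0 at every key.
theorem pv_getD_insert_zero (l : List String) (d : PySem.Dict String Int)
    (h : ∀ k, d.getD k 0 = 0) (k : String) :
    (l.foldl (fun d w => d.insert w 0) d).getD k 0 = 0 := by
  induction l generalizing d with
  | nil => exact h k
  | cons w l ih =>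
      simp only [List.foldl_cons]
      exact ih _ (fun k' => by rw [PySem.Dict.getD_insert]; split <;> simp [h])

-- Phase 2 of A never changes the key set.
theorem pv_phase2_keys (l : List String) (d : PySem.Dict String Int) :
    (l.foldl (fun d w => if d.contains w then d.modify w 0 (· + 1) else d) d).keys = d.keys := by
  induction l generalizing d with
  | nil => rfl
  | cons w l ih =>
      simp only [List.foldl_cons]
      by_cases hc : d.contains w = true
      · rw [if_pos hc, ih, PySem.Dict.keys_modify, PySem.Dict.keys_insert_of_contains _ _ hc]
      · rw [if_neg hc, ih]

-- Phase 2 of A adds, to each key already present, the number of its occurrences in l.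
theorem pv_phase2_getD (l : List String) (d : PySem.Dict String Int) (k : String)
    (hk : d.contains k = true) :
    (l.foldl (fun d w => if d.contains w then d.modify w 0 (· + 1) else d) d).getD k 0
      = d.getD k 0 + (l.count k : Int) := by
  induction l generalizing d with
  | nil => simp
  | cons w l ih =>
      simp only [List.foldl_cons]
      by_cases hc : d.contains w = true
      · rw [if_pos hc]
        have hck : (d.modify w 0 (· + 1)).contains k = true := by
          rw [PySem.Dict.contains_modify]; simp [hk]
        rw [ih _ hck, PySem.Dict.getD_modify]
        by_cases hkw : k = w
        · subst hkw; simp; ring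
        · rw [if_neg hkw]; simp only [List.count_cons, beq_iff_eq]
          rw [if_neg (fun h => hkw h.symm)]; simp
      · rw [if_neg hc]
        have hkw : k ≠ w := fun h => hc (h ▸ hk)
        rw [ih _ hk]; simp only [List.count_cons, beq_iff_eq]
        rw [if_neg (fun h => hkw h.symm)]; simp

-- B's single pass, characterised: it appends the not-yet-seen elements of l that pass the test.
theorem pv_altloop (cwf2_set : PySem.Set String) (l : List String)
    (seen : PySem.Set String) (res : List String) :
    (l.foldl
      (fun (st : PySem.Set String × List String) word =>
        if cwf2_set.contains word && !(PySem.Set.contains st.1 word) then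
          (PySem.Set.add st.1 word, st.2 ++ [word])
        else st)
      (seen, res)).2
    = res ++ (PySem.Set.ofList l).filter
        (fun w => cwf2_set.contains w && !(PySem.Set.contains seen w)) := by
  induction l generalizing seen res with
  | nil => simp
  | cons w l ih =>
      have hofl : PySem.Set.ofList (w :: l)
          = [w] ++ (PySem.Set.ofList l).filter (fun y => !(List.contains [w] y)) := by
        rw [show PySem.Set.ofList (w :: l) = PySem.Set.update (PySem.Set.add PySem.Set.empty w) l from rfl,
            PySem.Set.update_eq_append_filter]
        rfl
      simp only [List.foldl_cons]
      by_cases hc : (cwf2_set.contains w && !(PySem.Set.contains seen w)) = true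
      · rw [if_pos hc, ih, hofl]
        obtain ⟨h2, hs⟩ := Bool.and_eq_true_iff.mp hc
        have hsc : PySem.Set.contains seen w = false := by simpa using hs
        have hns : w ∉ seen := fun hm => by
          rw [(PySem.Set.contains_iff seen w).mpr hm] at hsc; cases hsc
        have hm2 : w ∈ cwf2_set := (PySem.Set.contains_iff cwf2_set w).mp h2
        have hadd : PySem.Set.add seen w = seen ++ [w] := by
          simp [PySem.Set.add, hns]
        simp only [List.filter_append, List.filter_filter]
        have hw : List.filter (fun x => cwf2_set.contains x && !(PySem.Set.contains seen x)) [w] = [w] := by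
          simp [hm2, hns]
        rw [hw]
        have hfc : (PySem.Set.ofList l).filter
              (fun y => cwf2_set.contains y && !(PySem.Set.contains (PySem.Set.add seen w) y))
            = (PySem.Set.ofList l).filter
              (fun a => !(List.contains [w] a) && (cwf2_set.contains a && !(PySem.Set.contains seen a))) := by
          apply List.filter_congr
          intro y _
          by_cases hyw : y = w
          · simp [PySem.Set.contains, hadd, hyw]
          · simp [PySem.Set.contains, hadd, hyw]
        rw [hfc]
        simp [Bool.and_comm]
      · rw [if_neg hc, ih, hofl]
        have himp : w ∈ cwf2_set → w ∈ seen := by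
          intro hm1
          by_contra hns
          apply hc
          rw [(PySem.Set.contains_iff cwf2_set w).mpr hm1]
          have hsc : PySem.Set.contains seen w = false := by
            rcases Bool.eq_false_or_eq_true (PySem.Set.contains seen w) with h | h
            · exact absurd ((PySem.Set.contains_iff seen w).mp h) hns
            · exact h
          rw [hsc]
          rfl
        simp only [List.filter_append, List.filter_filter]
        have hw : List.filter (fun x => cwf2_set.contains x && !(PySem.Set.contains seen x)) [w] = [] := by
          simp [List.filter_cons, PySem.Set.contains]
          exact himp
        rw [hw, List.nil_append]
        congr 1
        apply List.filter_congr
        intro y hy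
        by_cases hyw : y = w
        · subst hyw
          simp [PySem.Set.contains]
          exact himp
        · simp [PySem.Set.contains, hyw]

-- ===== VERDICT (by name: the statement is the Claim_ definition above) =====
theorem incommon_words_spec : Claim_equal_incommon_words := by
  intro cwf1 cwf2 _
  unfold Spec_incommon_words incommon_words incommon_words_alt
  simp only []
  -- A side
  set d0 : PySem.Dict String Int := cwf1.foldl (fun d word => d.insert word 0) PySem.Dict.empty with hd0
  set d1 : PySem.Dict String Int :=
    cwf2.foldl (fun d word => if d.contains word then d.modify word 0 (· + 1) else d) d0 with hd1
  have hkeys0 : d0.keys = PySem.Set.ofList cwf1 := by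
    rw [hd0, PySem.Dict.keys_foldl_insert cwf1 (fun _ _ => (0 : Int)) PySem.Dict.empty]
    rfl
  have hkeys : d1.keys = PySem.Set.ofList cwf1 := by
    rw [hd1, pv_phase2_keys, hkeys0]
  have hA : d1.keys.foldl (fun acc each => if d1.getD each 0 > 0 then acc ++ [each] else acc) []
      = d1.keys.filter (fun each => decide (d1.getD each 0 > 0)) := by
    rw [PySem.List.foldl_append_ite_eq_filter (fun each => d1.getD each 0 > 0) d1.keys []]
    simp
  rw [hA, pv_altloop, List.nil_append, hkeys]
  apply List.filter_congr
  intro k hk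
  have hck : d0.contains k = true := by
    rw [PySem.Dict.contains_iff_mem_keys, hkeys0]; exact hk
  have hv : d1.getD k 0 = (cwf2.count k : Int) := by
    rw [hd1, pv_phase2_getD cwf2 d0 k hck, pv_getD_insert_zero cwf1 _ (by simp) k, zero_add]
  rw [hv]
  have hmem : List.contains (PySem.Set.ofList cwf2) k = true ↔ k ∈ cwf2 :=
    (PySem.Set.contains_iff (PySem.Set.ofList cwf2) k).trans (PySem.Set.mem_ofList cwf2 k)
  simp only [PySem.Set.empty, PySem.Set.contains, List.contains_nil, Bool.not_false, Bool.and_true]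
  by_cases hm : k ∈ cwf2
  · rw [hmem.mpr hm]
    simp only [decide_eq_true_eq]
    exact_mod_cast List.count_pos_iff.mpr hm
  · have h : List.contains (PySem.Set.ofList cwf2) k = false := by
      rcases Bool.eq_false_or_eq_true (List.contains (PySem.Set.ofList cwf2) k) with h | h
      · exact absurd (hmem.mp h) hm
      · exact h
    rw [h, List.count_eq_zero_of_not_mem hm]
    simp
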